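-- pv_equiv track=rewrite | github.com/mikeoborotov/mipt-bioinformatics | problem-25/problem_25.py | multiple_alignment_score
-- ===== SOURCE A (Python) =====
-- def multiple_alignment_score(strings):
--     n = len(strings[0])
--     m = len(strings[1])
--     p = len(strings[2])
--
--     # Initialize a 3D array to store scores for the alignments
--     dp = [[[0] * (p + 1) for _ in range(m + 1)] for _ in range(n + 1)]
--
--     # Fill in the dp array using dynamic programming
--     for i in range(1, n + 1):
--         for j in range(1, m + 1):
--             for k in range(1, p + 1):
--                 score = 1 if strings[0][i - 1] == strings[1][j - 1] == strings[2][k - 1] else 0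
--                 dp[i][j][k] = max(dp[i - 1][j][k], dp[i][j - 1][k], dp[i][j][k - 1],
--                                   dp[i - 1][j - 1][k], dp[i - 1][j][k - 1], dp[i][j - 1][k - 1],
--                                   dp[i - 1][j - 1][k - 1] + score)
--
--     # The result is the maximum score
--     max_score = dp[n][m][p]
--
--     # Backtrack to find the actual alignment
--     alignment = reconstruct_alignment(strings, dp, n, m, p)
--
--     return max_score, alignment
--
-- def reconstruct_alignment(strings, dp, i, j, k):
--     alignment = [""] * 3
--
--     while i > 0 and j > 0 and k > 0:
--         if strings[0][i - 1] == strings[1][j - 1] == strings[2][k - 1]: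
--             alignment[0] = strings[0][i - 1] + alignment[0]
--             alignment[1] = strings[1][j - 1] + alignment[1]
--             alignment[2] = strings[2][k - 1] + alignment[2]
--             i -= 1
--             j -= 1
--             k -= 1
--         elif dp[i - 1][j][k] >= dp[i][j - 1][k] and dp[i - 1][j][k] >= dp[i][j][k - 1]:
--             alignment[0] = strings[0][i - 1] + alignment[0]
--             alignment[1] = "-" + alignment[1]
--             alignment[2] = "-" + alignment[2]
--             i -= 1
--         elif dp[i][j - 1][k] >= dp[i - 1][j][k] and dp[i][j - 1][k] >= dp[i][j][k - 1]:
--             alignment[0] = "-" + alignment[0]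
--             alignment[1] = strings[1][j - 1] + alignment[1]
--             alignment[2] = "-" + alignment[2]
--             j -= 1
--         else:
--             alignment[0] = "-" + alignment[0]
--             alignment[1] = "-" + alignment[1]
--             alignment[2] = strings[2][k - 1] + alignment[2]
--             k -= 1
--
--     while i > 0:
--         alignment[0] = strings[0][i - 1] + alignment[0]
--         alignment[1] = "-" + alignment[1]
--         alignment[2] = "-" + alignment[2]
--         i -= 1
--
--     while j > 0:
--         alignment[0] = "-" + alignment[0]
--         alignment[1] = strings[1][j - 1] + alignment[1]
--         alignment[2] = "-" + alignment[2]
--         j -= 1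
--
--     while k > 0:
--         alignment[0] = "-" + alignment[0]
--         alignment[1] = "-" + alignment[1]
--         alignment[2] = strings[2][k - 1] + alignment[2]
--         k -= 1
--
--     return alignment
-- ===== SOURCE B (Python) =====
-- def multiple_alignment_score(strings):
--     # Top-down memoized recursion over the scoring recurrence instead of A's
--     # bottom-up triple-loop table, and a recursive reconstruction whose base
--     # case emits the leftover prefixes in closed form instead of A's three
--     # trailing while-loops.
--     s0, s1, s2 = strings[0], strings[1], strings[2]
--     n, m, p = len(s0), len(s1), len(s2)
--     memo = {}
--
--     def solve(i, j, k):
--         if i == 0 or j == 0 or k == 0: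
--             return 0
--         key = (i, j, k)
--         if key in memo:
--             return memo[key]
--         bonus = 1 if s0[i - 1] == s1[j - 1] == s2[k - 1] else 0
--         val = max(solve(i - 1, j, k), solve(i, j - 1, k), solve(i, j, k - 1),
--                   solve(i - 1, j - 1, k), solve(i - 1, j, k - 1),
--                   solve(i, j - 1, k - 1), solve(i - 1, j - 1, k - 1) + bonus)
--         memo[key] = val
--         return val
--
--     max_score = solve(n, m, p)
--
--     def rebuild(i, j, k):
--         if i == 0 or j == 0 or k == 0:
--             return ("-" * k + "-" * j + s0[:i],
--                     "-" * k + s1[:j] + "-" * i,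
--                     s2[:k] + "-" * j + "-" * i)
--         if s0[i - 1] == s1[j - 1] == s2[k - 1]:
--             x, y, z = rebuild(i - 1, j - 1, k - 1)
--             return (x + s0[i - 1], y + s1[j - 1], z + s2[k - 1])
--         va = solve(i - 1, j, k)
--         vb = solve(i, j - 1, k)
--         vc = solve(i, j, k - 1)
--         if va >= vb and va >= vc:
--             x, y, z = rebuild(i - 1, j, k)
--             return (x + s0[i - 1], y + "-", z + "-")
--         if vb >= va and vb >= vc:
--             x, y, z = rebuild(i, j - 1, k)
--             return (x + "-", y + s1[j - 1], z + "-")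
--         x, y, z = rebuild(i, j, k - 1)
--         return (x + "-", y + "-", z + s2[k - 1])
--
--     return max_score, list(rebuild(n, m, p))
-- ===== Notes on version B (the rewrite author's own statement) =====
-- stated objective: alternative
-- what changed: B computes the score table top-down with a memoized recursive solve(i,j,k) caching in a dict instead of A's bottom-up triple-loop 3D array, and rebuilds the alignment with a recursive function whose base case emits the leftover prefixes in closed form (string slices plus '-'-repeats) instead of A's iterative backtrack with three trailing while-loops.
import Mathlib
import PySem

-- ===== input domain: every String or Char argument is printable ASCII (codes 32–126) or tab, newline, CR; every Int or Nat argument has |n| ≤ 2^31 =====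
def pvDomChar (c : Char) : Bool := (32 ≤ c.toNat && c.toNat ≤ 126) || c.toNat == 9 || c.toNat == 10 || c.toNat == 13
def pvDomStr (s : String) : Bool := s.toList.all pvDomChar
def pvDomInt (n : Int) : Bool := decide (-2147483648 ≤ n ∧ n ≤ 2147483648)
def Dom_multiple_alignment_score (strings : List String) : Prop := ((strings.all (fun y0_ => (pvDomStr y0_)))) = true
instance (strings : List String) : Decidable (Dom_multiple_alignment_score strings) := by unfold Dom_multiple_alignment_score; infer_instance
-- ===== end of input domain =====

-- B computes the score table top-down with a memoized recursive solve over a dict instead of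
-- A's bottom-up triple-loop 3D array, and rebuilds the alignment recursively with a closed-form
-- base case instead of A's backtrack loop with three trailing while-loops (alternative decomposition).

-- Python's builtin max over 7 arguments (on ints the value is the plain maximum).
def pyMax7 (v1 v2 v3 v4 v5 v6 v7 : Int) : Int :=
  max v1 (max v2 (max v3 (max v4 (max v5 (max v6 v7)))))

-- ===== PORT A =====
-- dp[i][j][k] read; indices are in range on every access A makes, so getD is exact.
def pvGet3 (dp : List (List (List Int))) (i j k : Nat) : Int :=
  ((dp.getD i []).getD j []).getD k 0

-- dp[i][j][k] = v in-place assignment.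
def pvSet3 (dp : List (List (List Int))) (i j k : Nat) (v : Int) : List (List (List Int)) :=
  dp.set i ((dp.getD i []).set j (((dp.getD i []).getD j []).set k v))

-- body of A's innermost loop
def pvStepA (a b c : List Char) (dp : List (List (List Int))) (i j k : Nat) :
    List (List (List Int)) :=
  let score : Int :=
    if a.getD (i-1) ' ' = b.getD (j-1) ' ' ∧ b.getD (j-1) ' ' = c.getD (k-1) ' ' then 1 else 0
  pvSet3 dp i j k (pyMax7 (pvGet3 dp (i-1) j k) (pvGet3 dp i (j-1) k) (pvGet3 dp i j (k-1))
    (pvGet3 dp (i-1) (j-1) k) (pvGet3 dp (i-1) j (k-1)) (pvGet3 dp i (j-1) (k-1))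
    (pvGet3 dp (i-1) (j-1) (k-1) + score))

-- the triple `for i/j/k in range(1, …+1)` fill; range(1,n+1) has nonnegative bounds,
-- ported exactly as List.range' 1 n.
def pvFillA (a b c : List Char) (n m p : Nat) : List (List (List Int)) :=
  (List.range' 1 n).foldl (fun dp i =>
    (List.range' 1 m).foldl (fun dp j =>
      (List.range' 1 p).foldl (fun dp k => pvStepA a b c dp i j k) dp) dp)
    (List.replicate (n+1) (List.replicate (m+1) (List.replicate (p+1) (0:Int))))

-- main `while i > 0 and j > 0 and k > 0` loop of reconstruct_alignment
-- (string prepending `ch + alignment[x]` is cons on the char list; the fuel argument is a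
-- totality device only: the loop decreases i+j+k each pass, so fuel = i+j+k never runs out)
def pvReconLoopA (a b c : List Char) (dp : List (List (List Int))) :
    Nat → Nat → Nat → Nat → List Char → List Char → List Char →
      Nat × Nat × Nat × List Char × List Char × List Char
  | 0, i, j, k, al0, al1, al2 => (i, j, k, al0, al1, al2)
  | fuel+1, i, j, k, al0, al1, al2 =>
    if 0 < i ∧ 0 < j ∧ 0 < k then
      if a.getD (i-1) ' ' = b.getD (j-1) ' ' ∧ b.getD (j-1) ' ' = c.getD (k-1) ' ' then
        pvReconLoopA a b c dp fuel (i-1) (j-1) (k-1)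
          (a.getD (i-1) ' ' :: al0) (b.getD (j-1) ' ' :: al1) (c.getD (k-1) ' ' :: al2)
      else if pvGet3 dp (i-1) j k ≥ pvGet3 dp i (j-1) k ∧ pvGet3 dp (i-1) j k ≥ pvGet3 dp i j (k-1) then
        pvReconLoopA a b c dp fuel (i-1) j k (a.getD (i-1) ' ' :: al0) ('-' :: al1) ('-' :: al2)
      else if pvGet3 dp i (j-1) k ≥ pvGet3 dp (i-1) j k ∧ pvGet3 dp i (j-1) k ≥ pvGet3 dp i j (k-1) then
        pvReconLoopA a b c dp fuel i (j-1) k ('-' :: al0) (b.getD (j-1) ' ' :: al1) ('-' :: al2)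
      else
        pvReconLoopA a b c dp fuel i j (k-1) ('-' :: al0) ('-' :: al1) (c.getD (k-1) ' ' :: al2)
    else (i, j, k, al0, al1, al2)

-- trailing `while i > 0` loop
def pvTailIA (a : List Char) (i : Nat) (al0 al1 al2 : List Char) :
    List Char × List Char × List Char :=
  match i with
  | 0 => (al0, al1, al2)
  | Nat.succ i' => pvTailIA a i' (a.getD i' ' ' :: al0) ('-' :: al1) ('-' :: al2)

-- trailing `while j > 0` loop
def pvTailJA (b : List Char) (j : Nat) (al0 al1 al2 : List Char) :
    List Char × List Char × List Char :=
  match j with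
  | 0 => (al0, al1, al2)
  | Nat.succ j' => pvTailJA b j' ('-' :: al0) (b.getD j' ' ' :: al1) ('-' :: al2)

-- trailing `while k > 0` loop
def pvTailKA (c : List Char) (k : Nat) (al0 al1 al2 : List Char) :
    List Char × List Char × List Char :=
  match k with
  | 0 => (al0, al1, al2)
  | Nat.succ k' => pvTailKA c k' ('-' :: al0) ('-' :: al1) (c.getD k' ' ' :: al2)

-- reconstruct_alignment(strings, dp, n, m, p)
def pvReconA (a b c : List Char) (dp : List (List (List Int))) (i j k : Nat) : List String :=
  let r := pvReconLoopA a b c dp (i+j+k) i j k [] [] []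
  let s := pvTailIA a r.1 r.2.2.2.1 r.2.2.2.2.1 r.2.2.2.2.2
  let t := pvTailJA b r.2.1 s.1 s.2.1 s.2.2
  let u := pvTailKA c r.2.2.1 t.1 t.2.1 t.2.2
  [String.ofList u.1, String.ofList u.2.1, String.ofList u.2.2]

-- strings[0], strings[1], strings[2]: in range under Pre_ (length ≥ 3), so getD is exact.
def multiple_alignment_score (strings : List String) : Int × List String :=
  let a := (strings.getD 0 "").toList
  let b := (strings.getD 1 "").toList
  let c := (strings.getD 2 "").toList
  let n := a.length
  let m := b.length
  let p := c.length
  let dp := pvFillA a b c n m p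
  (pvGet3 dp n m p, pvReconA a b c dp n m p)

-- ===== PORT B =====
-- B's memoized recursive solve(i, j, k): the dict `memo` is threaded through the recursive
-- calls exactly as Python mutates it; `if key in memo: return memo[key]` is the match on get?.
-- The fuel argument is a totality device only: every call decreases i+j+k, so fuel = i+j+k
-- (supplied at each call site) never runs out.
def pvSolveB (a b c : List Char) :
    Nat → Nat → Nat → Nat → PySem.Dict (Nat × Nat × Nat) Int →
      Int × PySem.Dict (Nat × Nat × Nat) Int
  | 0, _, _, _, memo => (0, memo)
  | fuel+1, i, j, k, memo =>
    if i = 0 ∨ j = 0 ∨ k = 0 then (0, memo)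
    else
      match memo.get? (i, j, k) with
      | some v => (v, memo)
      | none =>
        let bonus : Int :=
          if a.getD (i-1) ' ' = b.getD (j-1) ' ' ∧ b.getD (j-1) ' ' = c.getD (k-1) ' ' then 1 else 0
        let q1 := pvSolveB a b c fuel (i-1) j k memo
        let q2 := pvSolveB a b c fuel i (j-1) k q1.2
        let q3 := pvSolveB a b c fuel i j (k-1) q2.2
        let q4 := pvSolveB a b c fuel (i-1) (j-1) k q3.2
        let q5 := pvSolveB a b c fuel (i-1) j (k-1) q4.2
        let q6 := pvSolveB a b c fuel i (j-1) (k-1) q5.2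
        let q7 := pvSolveB a b c fuel (i-1) (j-1) (k-1) q6.2
        let v := pyMax7 q1.1 q2.1 q3.1 q4.1 q5.1 q6.1 (q7.1 + bonus)
        (v, q7.2.insert (i, j, k) v)

-- B's recursive rebuild(i, j, k); the base case emits the leftover prefixes in closed form:
-- "-"*r is List.replicate r '-', s[:i] is List.take i; x + ch appends one char. The fuel
-- argument is a totality device only (fuel = i+j+k at every call never runs out).
def pvRebuildB (a b c : List Char) :
    Nat → Nat → Nat → Nat → PySem.Dict (Nat × Nat × Nat) Int →
      (List Char × List Char × List Char) × PySem.Dict (Nat × Nat × Nat) Int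
  | 0, i, j, k, memo =>
    ((List.replicate k '-' ++ List.replicate j '-' ++ a.take i,
      List.replicate k '-' ++ b.take j ++ List.replicate i '-',
      c.take k ++ List.replicate j '-' ++ List.replicate i '-'), memo)
  | fuel+1, i, j, k, memo =>
    if i = 0 ∨ j = 0 ∨ k = 0 then
      ((List.replicate k '-' ++ List.replicate j '-' ++ a.take i,
        List.replicate k '-' ++ b.take j ++ List.replicate i '-',
        c.take k ++ List.replicate j '-' ++ List.replicate i '-'), memo)
    else if a.getD (i-1) ' ' = b.getD (j-1) ' ' ∧ b.getD (j-1) ' ' = c.getD (k-1) ' ' then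
      let r := pvRebuildB a b c fuel (i-1) (j-1) (k-1) memo
      ((r.1.1 ++ [a.getD (i-1) ' '], r.1.2.1 ++ [b.getD (j-1) ' '], r.1.2.2 ++ [c.getD (k-1) ' ']),
        r.2)
    else
      let va := pvSolveB a b c fuel (i-1) j k memo
      let vb := pvSolveB a b c fuel i (j-1) k va.2
      let vc := pvSolveB a b c fuel i j (k-1) vb.2
      if va.1 ≥ vb.1 ∧ va.1 ≥ vc.1 then
        let r := pvRebuildB a b c fuel (i-1) j k vc.2
        ((r.1.1 ++ [a.getD (i-1) ' '], r.1.2.1 ++ ['-'], r.1.2.2 ++ ['-']), r.2)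
      else if vb.1 ≥ va.1 ∧ vb.1 ≥ vc.1 then
        let r := pvRebuildB a b c fuel i (j-1) k vc.2
        ((r.1.1 ++ ['-'], r.1.2.1 ++ [b.getD (j-1) ' '], r.1.2.2 ++ ['-']), r.2)
      else
        let r := pvRebuildB a b c fuel i j (k-1) vc.2
        ((r.1.1 ++ ['-'], r.1.2.1 ++ ['-'], r.1.2.2 ++ [c.getD (k-1) ' ']), r.2)

-- strings[0], strings[1], strings[2]: in range under Pre_ (length ≥ 3), so getD is exact.
def multiple_alignment_score_alt (strings : List String) : Int × List String :=
  let a := (strings.getD 0 "").toList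
  let b := (strings.getD 1 "").toList
  let c := (strings.getD 2 "").toList
  let q := pvSolveB a b c (a.length + b.length + c.length) a.length b.length c.length
    PySem.Dict.empty
  let r := pvRebuildB a b c (a.length + b.length + c.length) a.length b.length c.length q.2
  (q.1, [String.ofList r.1.1, String.ofList r.1.2.1, String.ofList r.1.2.2])

-- ===== PRECONDITION & SPEC =====
-- Pre_ excludes inputs with fewer than 3 strings, on which A raises IndexError at strings[2].
def Pre_multiple_alignment_score (strings : List String) : Prop := 3 ≤ strings.length
instance (strings : List String) : Decidable (Pre_multiple_alignment_score strings) := by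
  unfold Pre_multiple_alignment_score; infer_instance

def pvWitness_multiple_alignment_score : List String := ["acb", "ab", "cb"]

def Spec_multiple_alignment_score (strings : List String) (out : Int × List String) : Prop := out = multiple_alignment_score_alt strings
instance (strings : List String) (out : Int × List String) : Decidable (Spec_multiple_alignment_score strings out) := by unfold Spec_multiple_alignment_score; infer_instance

-- ===== CLAIM (what is proved, stated in full; the proofs are below) =====
def Claim_equal_multiple_alignment_score : Prop := ∀ (strings : List String), Dom_multiple_alignment_score strings → Pre_multiple_alignment_score strings → Spec_multiple_alignment_score strings (multiple_alignment_score strings)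

-- ===== LEMMAS AND PROOFS =====

-- the mathematical recurrence both tables compute
def dpF (a b c : List Char) (i j k : Nat) : Int :=
  if i = 0 ∨ j = 0 ∨ k = 0 then 0
  else
    pyMax7 (dpF a b c (i-1) j k) (dpF a b c i (j-1) k) (dpF a b c i j (k-1))
      (dpF a b c (i-1) (j-1) k) (dpF a b c (i-1) j (k-1)) (dpF a b c i (j-1) (k-1))
      (dpF a b c (i-1) (j-1) (k-1) +
        (if a.getD (i-1) ' ' = b.getD (j-1) ' ' ∧ b.getD (j-1) ' ' = c.getD (k-1) ' '
         then 1 else 0))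
termination_by i + j + k
decreasing_by all_goals omega

theorem pvDpF_boundary (a b c : List Char) (i j k : Nat) (h : i = 0 ∨ j = 0 ∨ k = 0) :
    dpF a b c i j k = 0 := by
  rw [dpF]; simp [h]

theorem pvDpF_interior (a b c : List Char) (i j k : Nat) (h : ¬(i = 0 ∨ j = 0 ∨ k = 0)) :
    dpF a b c i j k =
      pyMax7 (dpF a b c (i-1) j k) (dpF a b c i (j-1) k) (dpF a b c i j (k-1))
        (dpF a b c (i-1) (j-1) k) (dpF a b c (i-1) j (k-1)) (dpF a b c i (j-1) (k-1))
        (dpF a b c (i-1) (j-1) (k-1) +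
          (if a.getD (i-1) ' ' = b.getD (j-1) ' ' ∧ b.getD (j-1) ' ' = c.getD (k-1) ' '
           then 1 else 0)) := by
  conv_lhs => rw [dpF]
  simp [h]

theorem pvGetD_set {α : Type} (l : List α) (i j : Nat) (x d : α) (hi : i < l.length) :
    (l.set i x).getD j d = if i = j then x else l.getD j d := by
  simp only [List.getD, List.getElem?_set, hi, if_true]
  split <;> simp

theorem pvGetD_mem {α : Type} (l : List α) (i : Nat) (d : α) (hi : i < l.length) :
    l.getD i d ∈ l := by
  rw [List.getD, List.getElem?_eq_getElem hi]
  exact List.getElem_mem hi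

def pvShape (n m p : Nat) (dp : List (List (List Int))) : Prop :=
  dp.length = n+1 ∧ ∀ r ∈ dp, r.length = m+1 ∧ ∀ q ∈ r, q.length = p+1

theorem pvShape_set3 (n m p i j k : Nat) (dp : List (List (List Int))) (v : Int)
    (h : pvShape n m p dp) (hi : i ≤ n) (hj : j ≤ m) : pvShape n m p (pvSet3 dp i j k v) := by
  obtain ⟨hlen, hmem⟩ := h
  have hiL : i < dp.length := by omega
  have hrow := hmem _ (pvGetD_mem dp i [] hiL)
  refine ⟨by simp [pvSet3, hlen], ?_⟩
  intro r hr
  rcases List.mem_or_eq_of_mem_set hr with hr' | hr'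
  · exact hmem r hr'
  · subst hr'
    have hjL : j < (dp.getD i []).length := by omega
    refine ⟨by rw [List.length_set]; exact hrow.1, ?_⟩
    intro q hq
    rcases List.mem_or_eq_of_mem_set hq with hq' | hq'
    · exact hrow.2 q hq'
    · subst hq'
      have := hrow.2 _ (pvGetD_mem _ j [] hjL)
      rw [List.length_set]; exact this

theorem pvGet3_set3 (n m p : Nat) (dp : List (List (List Int))) (i j k u v w : Nat) (x : Int)
    (h : pvShape n m p dp) (hi : i ≤ n) (hj : j ≤ m) (hk : k ≤ p)
    (hu : u ≤ n) (hv : v ≤ m) (hw : w ≤ p) :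
    pvGet3 (pvSet3 dp i j k x) u v w = if i = u ∧ j = v ∧ k = w then x else pvGet3 dp u v w := by
  obtain ⟨hlen, hmem⟩ := h
  have hiL : i < dp.length := by omega
  have hrow := hmem _ (pvGetD_mem dp i [] hiL)
  have hjL : j < (dp.getD i []).length := by omega
  have hinner := hrow.2 _ (pvGetD_mem _ j [] hjL)
  have hkL : k < ((dp.getD i []).getD j []).length := by omega
  unfold pvGet3 pvSet3
  rw [pvGetD_set _ _ _ _ _ hiL]
  by_cases hui : i = u
  · subst hui
    rw [if_pos rfl, pvGetD_set _ _ _ _ _ hjL]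
    by_cases hvj : j = v
    · subst hvj
      rw [if_pos rfl, pvGetD_set _ _ _ _ _ hkL]
      by_cases hwk : k = w
      · subst hwk; rw [if_pos rfl, if_pos ⟨rfl, rfl, rfl⟩]
      · rw [if_neg hwk, if_neg (by tauto)]
    · rw [if_neg hvj, if_neg (by tauto)]
  · rw [if_neg hui, if_neg (by tauto)]

theorem pvRepGetD {α : Type} (x d : α) (q i : Nat) :
    (List.replicate q x).getD i d = if i < q then x else d := by
  rcases Nat.lt_or_ge i q with h | h
  · rw [List.getD_replicate _ h, if_pos h]
  · rw [List.getD_eq_default _ _ (by simpa using h), if_neg (by omega)]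

theorem pvGet3_replicate (n m p u v w : Nat) :
    pvGet3 (List.replicate (n+1) (List.replicate (m+1) (List.replicate (p+1) (0:Int)))) u v w
      = 0 := by
  unfold pvGet3
  rw [pvRepGetD]
  split_ifs
  · rw [pvRepGetD]
    split_ifs
    · rw [pvRepGetD]; split_ifs <;> rfl
    · simp [List.getD]
  · simp [List.getD]

abbrev pvDone (i j k u v w : Nat) : Prop :=
  u = 0 ∨ v = 0 ∨ w = 0 ∨ u < i ∨ (u = i ∧ (v < j ∨ (v = j ∧ w ≤ k)))

def pvInvA (a b c : List Char) (n m p i j k : Nat) (dp : List (List (List Int))) : Prop :=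
  pvShape n m p dp ∧ ∀ u v w, u ≤ n → v ≤ m → w ≤ p →
    pvGet3 dp u v w = if pvDone i j k u v w then dpF a b c u v w else 0

theorem pvInvA_congr (a b c : List Char) (n m p i j k i' j' k' : Nat)
    (dp : List (List (List Int))) (h : pvInvA a b c n m p i j k dp)
    (hiff : ∀ u v w, u ≤ n → v ≤ m → w ≤ p → (pvDone i j k u v w ↔ pvDone i' j' k' u v w)) :
    pvInvA a b c n m p i' j' k' dp := by
  refine ⟨h.1, ?_⟩
  intro u v w hu hv hw
  rw [h.2 u v w hu hv hw]
  exact if_congr (hiff u v w hu hv hw) rfl rfl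

theorem pvStepA_inv (a b c : List Char) (n m p i j k : Nat) (dp : List (List (List Int)))
    (hi1 : 1 ≤ i) (hin : i ≤ n) (hj1 : 1 ≤ j) (hjm : j ≤ m) (hk1 : 1 ≤ k) (hkp : k ≤ p)
    (h : pvInvA a b c n m p i j (k-1) dp) :
    pvInvA a b c n m p i j k (pvStepA a b c dp i j k) := by
  obtain ⟨hsh, hval⟩ := h
  have hread : ∀ u v w, u ≤ n → v ≤ m → w ≤ p → pvDone i j (k-1) u v w →
      pvGet3 dp u v w = dpF a b c u v w := by
    intro u v w hu hv hw hd
    rw [hval u v w hu hv hw, if_pos hd]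
  have hstep : pvStepA a b c dp i j k = pvSet3 dp i j k (dpF a b c i j k) := by
    unfold pvStepA
    rw [pvDpF_interior a b c i j k (by omega)]
    rw [hread (i-1) j k (by omega) hjm hkp (by omega),
        hread i (j-1) k hin (by omega) hkp (by omega),
        hread i j (k-1) hin hjm (by omega) (by omega),
        hread (i-1) (j-1) k (by omega) (by omega) hkp (by omega),
        hread (i-1) j (k-1) (by omega) hjm (by omega) (by omega),
        hread i (j-1) (k-1) hin (by omega) (by omega) (by omega),
        hread (i-1) (j-1) (k-1) (by omega) (by omega) (by omega) (by omega)]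
  rw [hstep]
  refine ⟨pvShape_set3 n m p i j k dp _ hsh hin hjm, ?_⟩
  intro u v w hu hv hw
  rw [pvGet3_set3 n m p dp i j k u v w _ hsh hin hjm hkp hu hv hw]
  by_cases he : i = u ∧ j = v ∧ k = w
  · obtain ⟨h1, h2, h3⟩ := he
    subst h1; subst h2; subst h3
    rw [if_pos ⟨rfl, rfl, rfl⟩, if_pos (by omega)]
  · rw [if_neg he, hval u v w hu hv hw]
    exact if_congr (by constructor <;> (intro hd; rcases hd with _|_|_|_|_ <;> omega)) rfl rfl

theorem pvFillA_inner (a b c : List Char) (n m p i j : Nat) (dp : List (List (List Int)))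
    (hi1 : 1 ≤ i) (hin : i ≤ n) (hj1 : 1 ≤ j) (hjm : j ≤ m)
    (h : pvInvA a b c n m p i j 0 dp) :
    ∀ t, t ≤ p →
      pvInvA a b c n m p i j t
        ((List.range' 1 t).foldl (fun dp k => pvStepA a b c dp i j k) dp) := by
  intro t
  induction t with
  | zero => intro _; simpa using h
  | succ t ih =>
    intro ht
    rw [List.range'_1_concat, List.foldl_append]
    simp only [List.foldl_cons, List.foldl_nil]
    have prev := ih (by omega)
    have : pvInvA a b c n m p i j ((1+t) - 1)
        ((List.range' 1 t).foldl (fun dp k => pvStepA a b c dp i j k) dp) := by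
      refine pvInvA_congr a b c n m p i j t i j (1+t-1) _ prev ?_
      intro u v w hu hv hw; constructor <;> (intro hd; rcases hd with _|_|_|_|_ <;> omega)
    have res := pvStepA_inv a b c n m p i j (1+t) _ hi1 hin hj1 hjm (by omega) (by omega) this
    refine pvInvA_congr a b c n m p i j (1+t) i j (t+1) _ res ?_
    intro u v w hu hv hw; constructor <;> (intro hd; rcases hd with _|_|_|_|_ <;> omega)

theorem pvFillA_middle (a b c : List Char) (n m p i : Nat) (dp : List (List (List Int)))
    (hi1 : 1 ≤ i) (hin : i ≤ n)
    (h : pvInvA a b c n m p i 1 0 dp) :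
    ∀ t, t ≤ m →
      pvInvA a b c n m p i t p
        ((List.range' 1 t).foldl (fun dp j =>
          (List.range' 1 p).foldl (fun dp k => pvStepA a b c dp i j k) dp) dp) := by
  intro t
  induction t with
  | zero =>
    intro _
    refine pvInvA_congr a b c n m p i 1 0 i 0 p _ h ?_
    intro u v w hu hv hw; constructor <;> (intro hd; rcases hd with _|_|_|_|_ <;> omega)
  | succ t ih =>
    intro ht
    rw [List.range'_1_concat, List.foldl_append]
    simp only [List.foldl_cons, List.foldl_nil]
    have prev := ih (by omega)
    have start : pvInvA a b c n m p i (1+t) 0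
        ((List.range' 1 t).foldl (fun dp j =>
          (List.range' 1 p).foldl (fun dp k => pvStepA a b c dp i j k) dp) dp) := by
      refine pvInvA_congr a b c n m p i t p i (1+t) 0 _ prev ?_
      intro u v w hu hv hw; constructor <;> (intro hd; rcases hd with _|_|_|_|_ <;> omega)
    have res := pvFillA_inner a b c n m p i (1+t) _ hi1 hin (by omega) (by omega) start p le_rfl
    refine pvInvA_congr a b c n m p i (1+t) p i (t+1) p _ res ?_
    intro u v w hu hv hw; constructor <;> (intro hd; rcases hd with _|_|_|_|_ <;> omega)

theorem pvFillA_outer (a b c : List Char) (n m p : Nat) (dp : List (List (List Int)))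
    (h : pvInvA a b c n m p 1 1 0 dp) :
    ∀ t, t ≤ n →
      pvInvA a b c n m p t m p
        ((List.range' 1 t).foldl (fun dp i =>
          (List.range' 1 m).foldl (fun dp j =>
            (List.range' 1 p).foldl (fun dp k => pvStepA a b c dp i j k) dp) dp) dp) := by
  intro t
  induction t with
  | zero =>
    intro _
    refine pvInvA_congr a b c n m p 1 1 0 0 m p _ h ?_
    intro u v w hu hv hw; constructor <;> (intro hd; rcases hd with _|_|_|_|_ <;> omega)
  | succ t ih =>
    intro ht
    rw [List.range'_1_concat, List.foldl_append]
    simp only [List.foldl_cons, List.foldl_nil]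
    have prev := ih (by omega)
    have start : pvInvA a b c n m p (1+t) 1 0
        ((List.range' 1 t).foldl (fun dp i =>
          (List.range' 1 m).foldl (fun dp j =>
            (List.range' 1 p).foldl (fun dp k => pvStepA a b c dp i j k) dp) dp) dp) := by
      refine pvInvA_congr a b c n m p t m p (1+t) 1 0 _ prev ?_
      intro u v w hu hv hw; constructor <;> (intro hd; rcases hd with _|_|_|_|_ <;> omega)
    have res := pvFillA_middle a b c n m p (1+t) _ (by omega) (by omega) start m le_rfl
    refine pvInvA_congr a b c n m p (1+t) m p (t+1) m p _ res ?_
    intro u v w hu hv hw; constructor <;> (intro hd; rcases hd with _|_|_|_|_ <;> omega)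

theorem pvFillA_dpF (a b c : List Char) (n m p : Nat) :
    ∀ u v w, u ≤ n → v ≤ m → w ≤ p →
      pvGet3 (pvFillA a b c n m p) u v w = dpF a b c u v w := by
  have base : pvInvA a b c n m p 1 1 0
      (List.replicate (n+1) (List.replicate (m+1) (List.replicate (p+1) (0:Int)))) := by
    constructor
    · refine ⟨by simp, ?_⟩
      intro r hr
      rw [List.eq_of_mem_replicate hr]
      refine ⟨by simp, ?_⟩
      intro q hq
      rw [List.eq_of_mem_replicate hq]
      simp
    · intro u v w hu hv hw
      rw [pvGet3_replicate]
      split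
      · next hd =>
        rw [pvDpF_boundary a b c u v w (by rcases hd with _|_|_|_|_ <;> omega)]
      · rfl
  have fin := pvFillA_outer a b c n m p _ base n le_rfl
  intro u v w hu hv hw
  unfold pvFillA
  rw [fin.2 u v w hu hv hw, if_pos (by omega)]

-- invariant of B's memo dict: every cached value is the recurrence's value at its key
def pvInvM (a b c : List Char) (memo : PySem.Dict (Nat × Nat × Nat) Int) : Prop :=
  ∀ u v w x, memo.get? (u, v, w) = some x → x = dpF a b c u v w

theorem pvSolveB_aux (a b c : List Char) :
    ∀ (fuel i j k : Nat) (memo : PySem.Dict (Nat × Nat × Nat) Int), i + j + k ≤ fuel →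
      pvInvM a b c memo →
      (pvSolveB a b c fuel i j k memo).1 = dpF a b c i j k ∧
        pvInvM a b c (pvSolveB a b c fuel i j k memo).2 := by
  intro fuel
  induction fuel with
  | zero =>
    intro i j k memo hN hInv
    rw [pvSolveB, pvDpF_boundary a b c i j k (by omega)]
    exact ⟨rfl, hInv⟩
  | succ fuel ih =>
    intro i j k memo hN hInv
    by_cases h0 : i = 0 ∨ j = 0 ∨ k = 0
    · rw [pvSolveB, if_pos h0, pvDpF_boundary a b c i j k h0]
      exact ⟨rfl, hInv⟩
    · rw [pvSolveB, if_neg h0]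
      cases hm : memo.get? (i, j, k) with
      | some v =>
        simp only
        exact ⟨hInv i j k v hm, hInv⟩
      | none =>
        simp only
        have h1 := ih (i-1) j k memo (by omega) hInv
        have h2 := ih i (j-1) k _ (by omega) h1.2
        have h3 := ih i j (k-1) _ (by omega) h2.2
        have h4 := ih (i-1) (j-1) k _ (by omega) h3.2
        have h5 := ih (i-1) j (k-1) _ (by omega) h4.2
        have h6 := ih i (j-1) (k-1) _ (by omega) h5.2
        have h7 := ih (i-1) (j-1) (k-1) _ (by omega) h6.2
        rw [h1.1, h2.1, h3.1, h4.1, h5.1, h6.1, h7.1]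
        refine ⟨(pvDpF_interior a b c i j k h0).symm, ?_⟩
        intro u v w x hx
        rw [PySem.Dict.get?_insert] at hx
        split at hx
        · next he =>
          simp only [Prod.mk.injEq] at he
          obtain ⟨hu, hv, hw⟩ := he
          subst hu; subst hv; subst hw
          cases hx
          exact (pvDpF_interior a b c u v w h0).symm
        · exact h7.2 u v w x hx

theorem pvSolveB_dpF (a b c : List Char) (fuel i j k : Nat)
    (memo : PySem.Dict (Nat × Nat × Nat) Int) (hfuel : i + j + k ≤ fuel)
    (hInv : pvInvM a b c memo) :
    (pvSolveB a b c fuel i j k memo).1 = dpF a b c i j k ∧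
      pvInvM a b c (pvSolveB a b c fuel i j k memo).2 :=
  pvSolveB_aux a b c fuel i j k memo hfuel hInv

-- the tail-loop pipeline of A's reconstruct (the part after the main while loop)
def pvTails (a b c : List Char) (r : Nat × Nat × Nat × List Char × List Char × List Char) :
    List Char × List Char × List Char :=
  let s := pvTailIA a r.1 r.2.2.2.1 r.2.2.2.2.1 r.2.2.2.2.2
  let t := pvTailJA b r.2.1 s.1 s.2.1 s.2.2
  pvTailKA c r.2.2.1 t.1 t.2.1 t.2.2

theorem pvTailIA_closed (a : List Char) :
    ∀ (i : Nat) (x y z : List Char), i ≤ a.length →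
      pvTailIA a i x y z =
        (a.take i ++ x, List.replicate i '-' ++ y, List.replicate i '-' ++ z) := by
  intro i
  induction i with
  | zero => intro x y z _; simp [pvTailIA]
  | succ i ih =>
    intro x y z hi
    rw [pvTailIA, ih _ _ _ (by omega)]
    have : a.take (i+1) = a.take i ++ [a.getD i ' '] := by
      rw [List.take_add_one, List.getElem?_eq_getElem (by omega),
        List.getD_eq_getElem a ' ' (by omega)]
      rfl
    rw [this, List.replicate_succ']
    simp

theorem pvTailJA_closed (b : List Char) :
    ∀ (j : Nat) (x y z : List Char), j ≤ b.length →
      pvTailJA b j x y z =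
        (List.replicate j '-' ++ x, b.take j ++ y, List.replicate j '-' ++ z) := by
  intro j
  induction j with
  | zero => intro x y z _; simp [pvTailJA]
  | succ j ih =>
    intro x y z hj
    rw [pvTailJA, ih _ _ _ (by omega)]
    have : b.take (j+1) = b.take j ++ [b.getD j ' '] := by
      rw [List.take_add_one, List.getElem?_eq_getElem (by omega),
        List.getD_eq_getElem b ' ' (by omega)]
      rfl
    rw [this, List.replicate_succ']
    simp

theorem pvTailKA_closed (c : List Char) :
    ∀ (k : Nat) (x y z : List Char), k ≤ c.length →
      pvTailKA c k x y z =
        (List.replicate k '-' ++ x, List.replicate k '-' ++ y, c.take k ++ z) := by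
  intro k
  induction k with
  | zero => intro x y z _; simp [pvTailKA]
  | succ k ih =>
    intro x y z hk
    rw [pvTailKA, ih _ _ _ (by omega)]
    have : c.take (k+1) = c.take k ++ [c.getD k ' '] := by
      rw [List.take_add_one, List.getElem?_eq_getElem (by omega),
        List.getD_eq_getElem c ' ' (by omega)]
      rfl
    rw [this, List.replicate_succ']
    simp

theorem pvRebuild_base (a b c : List Char) (dp : List (List (List Int))) (fuel i j k : Nat)
    (x y z : List Char) (memo : PySem.Dict (Nat × Nat × Nat) Int)
    (h0 : i = 0 ∨ j = 0 ∨ k = 0) (hi : i ≤ a.length) (hj : j ≤ b.length) (hk : k ≤ c.length) :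
    pvTails a b c (pvReconLoopA a b c dp fuel i j k x y z) =
      ((pvRebuildB a b c fuel i j k memo).1.1 ++ x,
       (pvRebuildB a b c fuel i j k memo).1.2.1 ++ y,
       (pvRebuildB a b c fuel i j k memo).1.2.2 ++ z) := by
  have hloop : pvReconLoopA a b c dp fuel i j k x y z = (i, j, k, x, y, z) := by
    cases fuel with
    | zero => rw [pvReconLoopA]
    | succ fuel => rw [pvReconLoopA, if_neg (by omega)]
  have hrb : (pvRebuildB a b c fuel i j k memo).1 =
      (List.replicate k '-' ++ List.replicate j '-' ++ a.take i,
       List.replicate k '-' ++ b.take j ++ List.replicate i '-',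
       c.take k ++ List.replicate j '-' ++ List.replicate i '-') := by
    cases fuel with
    | zero => rw [pvRebuildB]
    | succ fuel => rw [pvRebuildB, if_pos h0]
  rw [hloop, hrb]
  unfold pvTails
  simp only
  rw [pvTailIA_closed a i x y z hi]
  simp only
  rw [pvTailJA_closed b j _ _ _ hj]
  simp only
  rw [pvTailKA_closed c k _ _ _ hk]
  simp [List.append_assoc, -List.replicate_append_replicate]

theorem pvRebuild_spec (a b c : List Char) (dp : List (List (List Int)))
    (HA : ∀ u v w, u ≤ a.length → v ≤ b.length → w ≤ c.length →
      pvGet3 dp u v w = dpF a b c u v w) :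
    ∀ (fuel i j k : Nat) (memo : PySem.Dict (Nat × Nat × Nat) Int) (x y z : List Char),
      i + j + k ≤ fuel → i ≤ a.length → j ≤ b.length → k ≤ c.length → pvInvM a b c memo →
      pvTails a b c (pvReconLoopA a b c dp fuel i j k x y z) =
        ((pvRebuildB a b c fuel i j k memo).1.1 ++ x,
         (pvRebuildB a b c fuel i j k memo).1.2.1 ++ y,
         (pvRebuildB a b c fuel i j k memo).1.2.2 ++ z) := by
  intro fuel
  induction fuel with
  | zero =>
    intro i j k memo x y z hN hi hj hk hInv
    exact pvRebuild_base a b c dp 0 i j k x y z memo (by omega) hi hj hk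
  | succ fuel ih =>
    intro i j k memo x y z hN hi hj hk hInv
    by_cases h0 : i = 0 ∨ j = 0 ∨ k = 0
    · exact pvRebuild_base a b c dp (fuel+1) i j k x y z memo h0 hi hj hk
    · rw [pvReconLoopA, if_pos (by omega), pvRebuildB, if_neg h0]
      by_cases hm : a.getD (i-1) ' ' = b.getD (j-1) ' ' ∧ b.getD (j-1) ' ' = c.getD (k-1) ' '
      · rw [if_pos hm, if_pos hm]
        simp only
        rw [ih (i-1) (j-1) (k-1) memo _ _ _ (by omega) (by omega) (by omega) (by omega) hInv]
        simp
      · rw [if_neg hm, if_neg hm]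
        simp only
        have h1 := pvSolveB_dpF a b c fuel (i-1) j k memo (by omega) hInv
        have h2 := pvSolveB_dpF a b c fuel i (j-1) k _ (by omega) h1.2
        have h3 := pvSolveB_dpF a b c fuel i j (k-1) _ (by omega) h2.2
        rw [h1.1, h2.1, h3.1,
          HA (i-1) j k (by omega) hj hk, HA i (j-1) k hi (by omega) hk,
          HA i j (k-1) hi hj (by omega)]
        split_ifs with c1 c2
        · simp only
          rw [ih (i-1) j k _ _ _ _ (by omega) (by omega) hj hk h3.2]
          simp
        · simp only
          rw [ih i (j-1) k _ _ _ _ (by omega) hi (by omega) hk h3.2]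
          simp
        · simp only
          rw [ih i j (k-1) _ _ _ _ (by omega) hi hj (by omega) h3.2]
          simp

theorem pvReconA_tails (a b c : List Char) (dp : List (List (List Int))) (i j k : Nat) :
    pvReconA a b c dp i j k =
      [String.ofList (pvTails a b c (pvReconLoopA a b c dp (i+j+k) i j k [] [] [])).1,
       String.ofList (pvTails a b c (pvReconLoopA a b c dp (i+j+k) i j k [] [] [])).2.1,
       String.ofList (pvTails a b c (pvReconLoopA a b c dp (i+j+k) i j k [] [] [])).2.2] := rfl

theorem pvInvM_empty (a b c : List Char) : pvInvM a b c PySem.Dict.empty := by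
  intro u v w x hx
  simp [PySem.Dict.get?_empty] at hx

-- ===== VERDICT (by name: the statement is the Claim_ definition above) =====
theorem multiple_alignment_score_spec : Claim_equal_multiple_alignment_score := by
  intro strings _ _
  unfold Spec_multiple_alignment_score multiple_alignment_score multiple_alignment_score_alt
  dsimp only
  generalize (strings.getD 0 "").toList = a
  generalize (strings.getD 1 "").toList = b
  generalize (strings.getD 2 "").toList = c
  have HA := pvFillA_dpF a b c a.length b.length c.length
  have hq := pvSolveB_dpF a b c (a.length + b.length + c.length)
    a.length b.length c.length PySem.Dict.empty le_rfl (pvInvM_empty a b c)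
  rw [Prod.mk.injEq]
  refine ⟨?_, ?_⟩
  · rw [HA a.length b.length c.length le_rfl le_rfl le_rfl, hq.1]
  · have hrec := pvRebuild_spec a b c (pvFillA a b c a.length b.length c.length) HA
      (a.length + b.length + c.length) a.length b.length c.length
      (pvSolveB a b c (a.length + b.length + c.length) a.length b.length c.length
        PySem.Dict.empty).2 [] [] []
      le_rfl le_rfl le_rfl le_rfl hq.2
    simp only [List.append_nil] at hrec
    rw [pvReconA_tails, hrec]
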